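-- pv_equiv track=rewrite | github.com/Iwantcod/pooli-be | scripts/test-data/generate_test_data_csv.py | compute_shared_usage_series
-- ===== SOURCE A (Python) =====
-- def compute_shared_usage_series(total_series: list[int], basic_amount: int, is_unlimited: int) -> list[int]:
--     if is_unlimited == 1:
--         return [0 for _ in total_series]
--
--     shared_series: list[int] = []
--     cumulative = 0
--     for total_usage in total_series:
--         prev = cumulative
--         cumulative += total_usage
--         shared_today = max(0, cumulative - basic_amount) - max(0, prev - basic_amount)
--         shared_series.append(shared_today)
--     return shared_series
-- ===== SOURCE B (Python) =====
-- def compute_shared_usage_series(total_series: list[int], basic_amount: int, is_unlimited: int) -> list[int]: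
--     if is_unlimited == 1:
--         return [0] * len(total_series)
--
--     def overflow(k: int) -> int:
--         # usage beyond the basic allowance accumulated over the first k days,
--         # recomputed from scratch each time (no running state)
--         return max(0, sum(total_series[:k]) - basic_amount)
--
--     return [overflow(i + 1) - overflow(i) for i in range(len(total_series))]
-- ===== Notes on version B (the rewrite author's own statement) =====
-- stated objective: simpler
-- what changed: Replaces A's fused single-pass loop carrying prev/cumulative state by a stateless per-index formula: each step is overflow(i+1)-overflow(i), where overflow(k) recomputes max(0, sum(total_series[:k]) - basic_amount) from scratch.
import Mathlib
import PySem

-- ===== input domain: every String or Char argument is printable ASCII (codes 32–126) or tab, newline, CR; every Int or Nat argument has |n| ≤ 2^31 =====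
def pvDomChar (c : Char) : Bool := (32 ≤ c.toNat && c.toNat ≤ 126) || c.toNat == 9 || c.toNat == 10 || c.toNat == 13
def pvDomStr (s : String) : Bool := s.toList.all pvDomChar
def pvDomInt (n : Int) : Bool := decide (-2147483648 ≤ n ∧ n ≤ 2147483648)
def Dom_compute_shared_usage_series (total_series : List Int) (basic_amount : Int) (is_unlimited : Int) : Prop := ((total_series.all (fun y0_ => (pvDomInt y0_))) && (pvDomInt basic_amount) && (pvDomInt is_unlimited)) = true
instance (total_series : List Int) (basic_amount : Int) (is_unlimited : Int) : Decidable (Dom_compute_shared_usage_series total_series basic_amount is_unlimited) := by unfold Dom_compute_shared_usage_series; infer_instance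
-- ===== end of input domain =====

-- B replaces A's fused running-state loop by a stateless per-index formula overflow(i+1)-overflow(i), each overflow recomputed from scratch (simpler decomposition, quadratic cost).


-- ===== PORT A =====
-- literal port of A: one fold carrying (shared_series, cumulative)
def compute_shared_usage_series (total_series : List Int) (basic_amount : Int) (is_unlimited : Int) : List Int :=
  if is_unlimited == 1 then total_series.map (fun _ => 0)
  else
    (total_series.foldl
      (fun (st : List Int × Int) total_usage =>
        let prev := st.2
        let cumulative := st.2 + total_usage
        (st.1 ++ [max 0 (cumulative - basic_amount) - max 0 (prev - basic_amount)], cumulative))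
      ([], 0)).1

-- ===== PORT B =====
-- literal port of Source B: helper overflow(k) = max(0, sum(total_series[:k]) - basic_amount), then a comprehension over range(len(...))
def cssOverflow (total_series : List Int) (basic_amount : Int) (k : Int) : Int :=
  max 0 ((PySem.List.slice total_series none (some k)).sum - basic_amount)

def compute_shared_usage_series_alt (total_series : List Int) (basic_amount : Int) (is_unlimited : Int) : List Int :=
  if is_unlimited == 1 then List.replicate total_series.length 0
  else
    (PySem.List.pyRange 0 (total_series.length : Int) 1).map
      (fun i => cssOverflow total_series basic_amount (i + 1) - cssOverflow total_series basic_amount i)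

-- ===== PRECONDITION & SPEC =====
def Spec_compute_shared_usage_series (total_series : List Int) (basic_amount : Int) (is_unlimited : Int) (out : List Int) : Prop := out = compute_shared_usage_series_alt total_series basic_amount is_unlimited
instance (total_series : List Int) (basic_amount : Int) (is_unlimited : Int) (out : List Int) : Decidable (Spec_compute_shared_usage_series total_series basic_amount is_unlimited out) := by unfold Spec_compute_shared_usage_series; infer_instance

-- ===== CLAIM (what is proved, stated in full; the proofs are below) =====
def Claim_equal_compute_shared_usage_series : Prop := ∀ (total_series : List Int) (basic_amount : Int) (is_unlimited : Int), Dom_compute_shared_usage_series total_series basic_amount is_unlimited → Spec_compute_shared_usage_series total_series basic_amount is_unlimited (compute_shared_usage_series total_series basic_amount is_unlimited)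

-- ===== LEMMAS AND PROOFS =====

-- per-step clamped-difference reference, starting from cumulative c
def pvRef (b c : Int) : List Int → List Int
  | [] => []
  | x :: r => (max 0 (c + x - b) - max 0 (c - b)) :: pvRef b (c + x) r

theorem pvA_foldl (b : Int) : ∀ (xs : List Int) (out : List Int) (c : Int),
    (xs.foldl
      (fun (st : List Int × Int) t =>
        (st.1 ++ [max 0 (st.2 + t - b) - max 0 (st.2 - b)], st.2 + t))
      (out, c)).1 = out ++ pvRef b c xs := by
  intro xs
  induction xs with
  | nil => intro out c; simp [pvRef]
  | cons x r ih => intro out c; simp [pvRef, ih]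

-- the reference list written index-wise via prefix sums (take)
theorem pvRef_eq_map_range (b : Int) : ∀ (xs : List Int) (c : Int),
    pvRef b c xs = (List.range xs.length).map
      (fun k => max 0 (c + (xs.take (k + 1)).sum - b) - max 0 (c + (xs.take k).sum - b)) := by
  intro xs
  induction xs with
  | nil => intro c; simp [pvRef]
  | cons x r ih =>
    intro c
    rw [pvRef, List.length_cons, List.range_succ_eq_map, List.map_cons, List.map_map]
    refine congrArg₂ List.cons (by simp) ?_
    rw [ih (c + x)]
    refine List.map_congr_left (fun k _ => ?_)
    simp [List.take_succ_cons, add_assoc]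

theorem compute_shared_usage_series_spec : Claim_equal_compute_shared_usage_series := by
  intro xs b u _
  unfold Spec_compute_shared_usage_series compute_shared_usage_series compute_shared_usage_series_alt
  by_cases hu : u == 1
  · simp [hu, List.map_const']
  · simp only [hu]
    rw [pvA_foldl b xs [] 0, List.nil_append, pvRef_eq_map_range]
    rw [PySem.List.pyRange_one]
    simp only [sub_zero, Int.toNat_natCast, List.map_map]
    refine List.map_congr_left (fun k _ => ?_)
    simp only [Function.comp, zero_add, cssOverflow]
    have h1 : ((k : Int) + 1) = ((k + 1 : Nat) : Int) := by push_cast; ring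
    rw [h1, PySem.List.slice_to_natCast, PySem.List.slice_to_natCast]
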